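-- pv_equiv track=rewrite | github.com/mouredev/retos-programacion-2023 | Retos/Reto #20 - LA TRIFUERZA [Media]/python/Maanghel.py | draw_triforce
-- ===== SOURCE A (Python) =====
-- def draw_triforce(n: int) -> str:
--     """
--     Genera una Trifuerza inspirada en "The Legend of Zelda" utilizando asteriscos.
--
--     La Trifuerza está compuesta por tres triángulos equiláteros:
--     uno superior y dos en la base. Cada triángulo tiene como fila más ancha
--     la longitud calculada con la fórmula ``2n - 1``.
--
--     Args:
--         n (int): Número de filas de cada triángulo. Debe ser un entero positivo.
--
--     Returns:
--         str: El patrón de la Trifuerza en forma de cadena.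
--
--     Raises:
--         TypeError: Si el valor proporcionado no es un entero.
--         ValueError: Si el número es negativo.
--     """
--     if not isinstance(n, int):
--         raise TypeError("Solo se admiten enteros positivos.")
--     if n <= 0:
--         raise ValueError("El número de filas debe ser un entero positivo.")
--
--     lines = []
--     for i in range(n):
--         lines.append(" " * (2 * n - i - 1) + "*" * (2 * i + 1))
--     for i in range(n):
--         left = " " * (n - i - 1) + "*" * (2 * i + 1)
--         right = "*" * (2 * i + 1)
--         middle = " " * (2 * (n - i) - 1)
--         lines.append(f"{left}{middle}{right}")
--
--     return "\n".join(lines)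
-- ===== SOURCE B (Python) =====
-- def draw_triforce(n: int) -> str:
--     if not isinstance(n, int):
--         raise TypeError("Solo se admiten enteros positivos.")
--     if n <= 0:
--         raise ValueError("El número de filas debe ser un entero positivo.")
--
--     indent = ' ' * n
--     row = ' ' * (n - 1) + '*'      # narrowest triangle row; each next row is derived from it
--     gap = ' ' * (2 * n - 1)        # widest inner gap; shrinks by two each row
--     top, bottom = [], []
--     for _ in range(n):
--         top.append(indent + row)
--         bottom.append(row + gap + row.lstrip())
--         row = row[1:] + '**'       # rewrite: drop one leading space, append two stars
--         gap = gap[2:]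
--     return '\n'.join(top + bottom)
-- ===== Notes on version B (the rewrite author's own statement) =====
-- stated objective: alternative
-- what changed: B replaces A's per-row arithmetic string multiplication with incremental string rewriting: each triangle row is derived from the previous one (drop one leading space, append two stars, gap shrinks by two), and a single loop reuses that row for both halves (indent for the top line, row + gap + row.lstrip() for the bottom line).
import Mathlib
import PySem

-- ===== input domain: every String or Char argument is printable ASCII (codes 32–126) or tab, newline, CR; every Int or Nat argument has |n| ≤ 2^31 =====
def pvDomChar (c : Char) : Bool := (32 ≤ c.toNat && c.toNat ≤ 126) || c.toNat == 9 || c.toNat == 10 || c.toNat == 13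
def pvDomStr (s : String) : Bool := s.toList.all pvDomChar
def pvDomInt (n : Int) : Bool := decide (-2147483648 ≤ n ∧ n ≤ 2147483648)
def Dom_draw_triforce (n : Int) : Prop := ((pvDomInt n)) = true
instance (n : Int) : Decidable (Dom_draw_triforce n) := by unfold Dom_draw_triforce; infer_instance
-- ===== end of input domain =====

-- B builds the figure by incremental string rewriting: the triangle's rows are derived each
-- from the previous (drop one leading space, append two stars) and reused for both halves,
-- instead of A's per-row arithmetic string multiplication (objective: alternative).

-- ===== PORT A =====
-- " " * k on an Int k is empty for k ≤ 0: List.replicate k.toNat matches Python exactly.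
def draw_triforce (n : Int) : String :=
  let lines : List String :=
    (PySem.List.pyRange 0 n 1).foldl (fun acc i =>
      acc ++ [String.ofList (List.replicate (2*n - i - 1).toNat ' ' ++
                             List.replicate (2*i + 1).toNat '*')]) []
  let lines : List String :=
    (PySem.List.pyRange 0 n 1).foldl (fun acc i =>
      let left := List.replicate (n - i - 1).toNat ' ' ++ List.replicate (2*i + 1).toNat '*'
      let right := List.replicate (2*i + 1).toNat '*'
      let middle := List.replicate (2*(n - i) - 1).toNat ' '
      acc ++ [String.ofList (left ++ middle ++ right)]) lines
  PySem.Str.join "\n" lines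

-- ===== PORT B =====
-- hand-port of str.lstrip(): drops leading whitespace; exact on B's rows (spaces then stars).
def pvLstrip (l : List Char) : List Char := l.dropWhile PySem.Chars.isspace

-- one iteration of B's loop (the Int element of range(n) is unused, as in Source B);
-- row[1:] / gap[2:] with nonnegative literal bounds are exactly List.drop 1 / List.drop 2.
def pvStep (blank : List Char) (s : List Char × List Char × List String × List String)
    (_ : Int) : List Char × List Char × List String × List String :=
  match s with
  | (row, gap, top, bottom) =>
    (row.drop 1 ++ ['*', '*'], gap.drop 2,
     top ++ [String.ofList (blank ++ row)],
     bottom ++ [String.ofList (row ++ gap ++ pvLstrip row)])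

def draw_triforce_alt (n : Int) : String :=
  let s := (PySem.List.pyRange 0 n 1).foldl (pvStep (List.replicate n.toNat ' '))
      (List.replicate (n - 1).toNat ' ' ++ ['*'], List.replicate (2*n - 1).toNat ' ', [], [])
  PySem.Str.join "\n" (s.2.2.1 ++ s.2.2.2)

-- ===== PRECONDITION & SPEC =====
-- A raises ValueError for n ≤ 0; Pre_ admits exactly the inputs on which A returns.
def Pre_draw_triforce (n : Int) : Prop := 0 < n
instance (n : Int) : Decidable (Pre_draw_triforce n) := by unfold Pre_draw_triforce; infer_instance
def pvWitness_draw_triforce : Int := 3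

def Spec_draw_triforce (n : Int) (out : String) : Prop := out = draw_triforce_alt n
instance (n : Int) (out : String) : Decidable (Spec_draw_triforce n out) := by unfold Spec_draw_triforce; infer_instance

-- ===== CLAIM (what is proved, stated in full; the proofs are below) =====
def Claim_equal_draw_triforce : Prop := ∀ (n : Int), Dom_draw_triforce n → Pre_draw_triforce n → Spec_draw_triforce n (draw_triforce n)

-- ===== LEMMAS AND PROOFS =====

-- the characters of A's i-th top / bottom line
def pvTop (n i : Int) : List Char :=
  List.replicate (2*n - i - 1).toNat ' ' ++ List.replicate (2*i + 1).toNat '*'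
def pvBot (n i : Int) : List Char :=
  (List.replicate (n - i - 1).toNat ' ' ++ List.replicate (2*i + 1).toNat '*') ++
    List.replicate (2*(n - i) - 1).toNat ' ' ++ List.replicate (2*i + 1).toNat '*'

-- B's loop state after i iterations
def pvRow (n i : Int) : List Char :=
  List.replicate (n - i - 1).toNat ' ' ++ List.replicate (2*i + 1).toNat '*'
def pvGap (n i : Int) : List Char := List.replicate (2*(n - i) - 1).toNat ' '

-- append-accumulator loop is a map
theorem pv_foldl_append_map {α β : Type} (l : List α) (f : α → β) (init : List β) :
    l.foldl (fun acc i => acc ++ [f i]) init = init ++ l.map f := by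
  induction l generalizing init with
  | nil => simp
  | cons x xs ih => simp [List.foldl_cons, ih, List.append_assoc]

theorem pv_dropWhile_space (a : Nat) (xs : List Char) :
    (List.replicate a ' ' ++ xs).dropWhile PySem.Chars.isspace
      = xs.dropWhile PySem.Chars.isspace := by
  induction a with
  | zero => simp
  | succ a ih => simpa [List.replicate_succ, List.dropWhile_cons] using ih

theorem pv_lstrip_row (n i : Int) (h0 : 0 ≤ i) :
    pvLstrip (pvRow n i) = List.replicate (2*i + 1).toNat '*' := by
  unfold pvLstrip pvRow
  rw [pv_dropWhile_space]
  rw [show (2*i + 1).toNat = (2*i).toNat + 1 by omega, List.replicate_succ,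
      List.dropWhile_cons]
  simp [PySem.Chars.isspace]

-- the three per-step facts of B's loop, for 0 ≤ i < n
theorem pv_step_top (n i : Int) (h0 : 0 ≤ i) (h1 : i < n) :
    List.replicate n.toNat ' ' ++ pvRow n i = pvTop n i := by
  unfold pvRow pvTop
  rw [← List.append_assoc, ← List.replicate_add,
      show n.toNat + (n - i - 1).toNat = (2*n - i - 1).toNat by omega]

theorem pv_step_bot (n i : Int) (h0 : 0 ≤ i) :
    pvRow n i ++ pvGap n i ++ pvLstrip (pvRow n i) = pvBot n i := by
  rw [pv_lstrip_row n i h0]; rfl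

theorem pv_step_row (n i : Int) (h0 : 0 ≤ i) (h1 : i + 1 < n) :
    (pvRow n i).drop 1 ++ ['*', '*'] = pvRow n (i + 1) := by
  unfold pvRow
  rw [show (n - i - 1).toNat = (n - (i+1) - 1).toNat + 1 by omega, List.replicate_succ,
      List.cons_append, List.drop_one, List.tail_cons, List.append_assoc,
      show (['*', '*'] : List Char) = List.replicate 2 '*' by rfl,
      ← List.replicate_add, show (2*i + 1).toNat + 2 = (2*(i+1) + 1).toNat by omega]

theorem pv_step_gap (n i : Int) (h1 : i + 1 < n) :
    (pvGap n i).drop 2 = pvGap n (i + 1) := by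
  unfold pvGap
  rw [List.drop_replicate, show (2*(n - i) - 1).toNat - 2 = (2*(n - (i+1)) - 1).toNat by omega]

-- B's loop, run over any index list of the right length, emits exactly A's lines
theorem pv_loop (n : Int) (l : List Int) :
    ∀ (i : Int) (T B : List String), 0 ≤ i → i + l.length = n →
    ((l.foldl (pvStep (List.replicate n.toNat ' ')) (pvRow n i, pvGap n i, T, B)).2.2) =
      (T ++ (List.range l.length).map (fun (k : Nat) => String.ofList (pvTop n (i + (k : Int)))),
       B ++ (List.range l.length).map (fun (k : Nat) => String.ofList (pvBot n (i + (k : Int))))) := by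
  induction l with
  | nil => intro i T B h0 h1; simp
  | cons x xs ih =>
    intro i T B h0 h1
    simp only [List.length_cons] at h1
    have hin : i < n := by omega
    rw [List.foldl_cons]
    show ((xs.foldl _ ((pvRow n i).drop 1 ++ ['*', '*'], (pvGap n i).drop 2,
            T ++ [String.ofList (List.replicate n.toNat ' ' ++ pvRow n i)],
            B ++ [String.ofList (pvRow n i ++ pvGap n i ++ pvLstrip (pvRow n i))])).2.2) = _
    rw [pv_step_top n i h0 hin, pv_step_bot n i h0]
    rw [List.length_cons, List.range_succ_eq_map, List.map_cons, List.map_cons,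
        List.map_map, List.map_map]
    cases xs with
    | nil =>
      simp
    | cons y ys =>
      have h2 : i + 1 < n := by simp at h1 ⊢; omega
      rw [pv_step_row n i h0 h2, pv_step_gap n i h2,
          ih (i + 1) _ _ (by omega) (by simp at h1 ⊢; omega)]
      simp only [Prod.mk.injEq, List.append_assoc, List.singleton_append,
        Nat.cast_zero, add_zero]
      constructor <;>
      · congr 1
        congr 1
        apply List.map_congr_left
        intro k _
        congr 2
        push_cast; ring

-- ===== VERDICT (by name: the statement is the Claim_ definition above) =====
theorem draw_triforce_spec : Claim_equal_draw_triforce := by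
  intro n _ hn
  have hn' : 0 < n := hn
  unfold Spec_draw_triforce draw_triforce draw_triforce_alt
  simp only [pv_foldl_append_map, List.nil_append]
  have hrow0 : List.replicate (n - 1).toNat ' ' ++ ['*'] = pvRow n 0 := by
    unfold pvRow
    norm_num
  have hgap0 : List.replicate (2*n - 1).toNat ' ' = pvGap n 0 := by
    unfold pvGap; norm_num
  rw [hrow0, hgap0,
      pv_loop n (PySem.List.pyRange 0 n 1) 0 [] [] le_rfl
        (by rw [PySem.List.length_pyRange_one]; omega)]
  simp only [List.nil_append, PySem.List.length_pyRange_one]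
  congr 1
  rw [PySem.List.pyRange_one 0 n, List.map_map, List.map_map]
  rw [show (n - 0).toNat = n.toNat by omega]
  simp [pvTop, pvBot, Function.comp_def, List.append_assoc]
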